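-- pv_equiv track=rewrite | github.com/GrayGhostDev/business-location-search | utils.py | classify_address
-- ===== SOURCE A (Python) =====
-- from typing import List, Dict, Tuple
--
-- def classify_address(address: str) -> Tuple[str, str]:
--     """
--     Classify an address as residential or commercial
--
--     Args:
--         address: Address string to classify
--
--     Returns:
--         Tuple of (classification, color)
--     """
--     # Common commercial indicators
--     commercial_indicators = [
--         'suite', 'ste', 'unit', 'floor', 'fl', '#',
--         'plaza', 'mall', 'building', 'bldg', 'office',
--         'commercial', 'industrial', 'shopping center',
--         'retail', 'store', 'shop'
--     ]
--
--     address_lower = address.lower()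
--
--     # Check for commercial indicators
--     is_commercial = any(indicator in address_lower for indicator in commercial_indicators)
--
--     if is_commercial:
--         return ('Commercial', '#FFD700')  # Yellow
--     else:
--         return ('Residential', '#90EE90')  # Light green
-- ===== SOURCE B (Python) =====
-- from typing import Tuple
--
-- _COMMERCIAL_INDICATORS = (
--     'suite', 'ste', 'unit', 'floor', 'fl', '#',
--     'plaza', 'mall', 'building', 'bldg', 'office',
--     'commercial', 'industrial', 'shopping center',
--     'retail', 'store', 'shop'
-- )
--
-- def classify_address(address: str) -> Tuple[str, str]:
--     # Single left-to-right position scan: at each position test whether some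
--     # indicator starts there, and stop at the first hit (instead of k
--     # independent full substring scans of the address).
--     low = address.lower()
--     for i in range(len(low)):
--         for ind in _COMMERCIAL_INDICATORS:
--             if low.startswith(ind, i):
--                 return ('Commercial', '#FFD700')
--     return ('Residential', '#90EE90')
-- ===== Notes on version B (the rewrite author's own statement) =====
-- stated objective: alternative
-- what changed: Replaces the 17 independent whole-address substring membership scans with one left-to-right scan over the lowered address that tests at each position whether some indicator starts there and returns at the first hit.
import Mathlib
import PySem

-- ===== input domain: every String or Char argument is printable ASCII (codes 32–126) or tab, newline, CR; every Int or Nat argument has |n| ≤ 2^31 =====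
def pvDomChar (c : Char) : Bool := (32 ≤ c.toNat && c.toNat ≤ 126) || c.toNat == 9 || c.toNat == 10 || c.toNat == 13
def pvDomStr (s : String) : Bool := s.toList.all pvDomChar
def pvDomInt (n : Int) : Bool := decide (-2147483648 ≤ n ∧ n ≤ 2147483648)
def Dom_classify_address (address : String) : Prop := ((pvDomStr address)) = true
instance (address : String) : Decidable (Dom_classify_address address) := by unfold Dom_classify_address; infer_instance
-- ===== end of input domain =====

-- B replaces A's 17 independent substring scans by one left-to-right position scan with early exit; same return value everywhere.

-- ===== PORT A =====
-- A's literal indicator list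
def pvIndicators : List String :=
  ["suite", "ste", "unit", "floor", "fl", "#",
   "plaza", "mall", "building", "bldg", "office",
   "commercial", "industrial", "shopping center",
   "retail", "store", "shop"]

def classify_address (address : String) : String × String :=
  let address_lower := PySem.Str.lower address
  let is_commercial := pvIndicators.any (fun indicator => PySem.Str.isIn indicator address_lower)
  if is_commercial then ("Commercial", "#FFD700") else ("Residential", "#90EE90")

-- ===== PORT B =====
-- B's indicator list as char lists (prefix tests per position)
def pvIndChars : List (List Char) := pvIndicators.map String.toList

-- one pass over the positions of the lowered address: does any indicator start here?
def pvScan : List Char → Bool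
  | [] => false
  | c :: rest => pvIndChars.any (fun ind => ind.isPrefixOf (c :: rest)) || pvScan rest

def classify_address_alt (address : String) : String × String :=
  if pvScan (PySem.Chars.lower address.toList) then ("Commercial", "#FFD700")
  else ("Residential", "#90EE90")

-- ===== PRECONDITION & SPEC =====
def Spec_classify_address (address : String) (out : String × String) : Prop := out = classify_address_alt address
instance (address : String) (out : String × String) : Decidable (Spec_classify_address address out) := by unfold Spec_classify_address; infer_instance

-- ===== CLAIM (what is proved, stated in full; the proofs are below) =====
def Claim_equal_classify_address : Prop := ∀ (address : String), Dom_classify_address address → Spec_classify_address address (classify_address address)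

-- ===== LEMMAS AND PROOFS =====
theorem pvScan_eq_exists (cl : List Char) :
    pvScan cl = true ↔ ∃ ind ∈ pvIndChars, ind <:+: cl := by
  induction cl with
  | nil =>
    simp only [pvScan]
    constructor
    · intro h; exact absurd h (by simp)
    · rintro ⟨ind, hmem, hinf⟩
      rw [List.infix_nil] at hinf
      subst hinf
      simp [pvIndChars, pvIndicators] at hmem
  | cons c rest ih =>
    simp only [pvScan, Bool.or_eq_true, List.any_eq_true, ih]
    constructor
    · rintro (⟨ind, hmem, hpre⟩ | ⟨ind, hmem, hinf⟩)
      · exact ⟨ind, hmem, (List.isPrefixOf_iff_prefix.mp hpre).isInfix⟩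
      · exact ⟨ind, hmem, hinf.trans (List.suffix_cons c rest).isInfix⟩
    · rintro ⟨ind, hmem, hinf⟩
      rcases List.infix_cons_iff.mp hinf with hpre | hinf'
      · exact Or.inl ⟨ind, hmem, List.isPrefixOf_iff_prefix.mpr hpre⟩
      · exact Or.inr ⟨ind, hmem, hinf'⟩

-- ===== VERDICT (by name: the statement is the Claim_ definition above) =====
theorem classify_address_spec : Claim_equal_classify_address := by
  intro address _
  unfold Spec_classify_address classify_address classify_address_alt
  have hcond : (pvIndicators.any fun indicator => PySem.Str.isIn indicator (PySem.Str.lower address))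
      = pvScan (PySem.Chars.lower address.toList) := by
    rw [Bool.eq_iff_iff]
    rw [pvScan_eq_exists]
    simp only [List.any_eq_true, PySem.Str.isIn_iff_infix, PySem.Str.toList_lower,
      pvIndChars, List.mem_map]
    constructor
    · rintro ⟨s, hs, hinf⟩; exact ⟨s.toList, ⟨s, hs, rfl⟩, hinf⟩
    · rintro ⟨ind, ⟨s, hs, rfl⟩, hinf⟩; exact ⟨s, hs, hinf⟩
  simp only [hcond]
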